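-- pv_equiv track=rewrite | github.com/Tropinene/advent_of_code | 2016/day7/day7.py | split_string_by_brackets
-- ===== SOURCE A (Python) =====
-- def split_string_by_brackets(input_string):
--     inside_brackets = []
--     outside_brackets = []
--
--     inside_flag = False
--     current_part = ""
--
--     for char in input_string:
--         if char == '[':
--             inside_flag = True
--             if current_part:
--                 outside_brackets.append(current_part)
--                 current_part = ""
--         elif char == ']':
--             inside_flag = False
--             if current_part:
--                 inside_brackets.append(current_part)
--                 current_part = ""
--         else:
--             current_part += char
--
--     # 处理最后一个部分
--     if current_part:
--         if inside_flag:
--             inside_brackets.append(current_part)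
--         else:
--             outside_brackets.append(current_part)
--
--     return inside_brackets, outside_brackets
-- ===== SOURCE B (Python) =====
-- def split_string_by_brackets(input_string):
--     # Pass 1: tokenize into (segment, terminating bracket) pairs plus a trailing segment.
--     pairs = []
--     cur = ""
--     for c in input_string:
--         if c == '[' or c == ']':
--             pairs.append((cur, c))
--             cur = ""
--         else:
--             cur += c
--     # Pass 2: classify each segment by the bracket that terminates it.
--     inside = [seg for seg, d in pairs if seg and d == ']']
--     outside = [seg for seg, d in pairs if seg and d == '[']
--     if cur:
--         if pairs and pairs[-1][1] == '[':
--             inside.append(cur)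
--         else:
--             outside.append(cur)
--     return inside, outside
-- ===== Notes on version B (the rewrite author's own statement) =====
-- stated objective: alternative
-- what changed: Replaces A's single stateful loop (inside_flag + on-the-fly appends to two lists) by a two-pass decomposition: first tokenize into (segment, terminating-bracket) pairs plus a trailing segment, then classify segments by their terminating bracket with two comprehensions and key the trailing segment off the last bracket seen.
import Mathlib
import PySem

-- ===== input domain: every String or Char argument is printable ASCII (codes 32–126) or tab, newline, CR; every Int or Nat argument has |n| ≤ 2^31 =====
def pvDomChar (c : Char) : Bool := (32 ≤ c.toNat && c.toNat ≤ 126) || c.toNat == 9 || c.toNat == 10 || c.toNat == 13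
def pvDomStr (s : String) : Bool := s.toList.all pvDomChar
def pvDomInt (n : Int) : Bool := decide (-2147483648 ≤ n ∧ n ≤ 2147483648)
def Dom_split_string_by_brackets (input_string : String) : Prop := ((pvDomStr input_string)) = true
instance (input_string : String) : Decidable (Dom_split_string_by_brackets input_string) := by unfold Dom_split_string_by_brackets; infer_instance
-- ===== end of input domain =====

-- B replaces A's single stateful loop (inside_flag) by tokenize-then-classify: same cost, different decomposition.


-- ===== PORT A =====
-- A's for-loop as structural recursion over the characters, with the loop state
-- (inside_brackets, outside_brackets, inside_flag, current_part) as arguments.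
def pvALoop : List Char → List String → List String → Bool → List Char → List String × List String
  | [], ins, outs, flag, cur =>
      -- 处理最后一个部分 (handle the last part)
      if cur ≠ [] then
        if flag then (ins ++ [String.ofList cur], outs) else (ins, outs ++ [String.ofList cur])
      else (ins, outs)
  | c :: cs, ins, outs, flag, cur =>
      if c = '[' then
        pvALoop cs ins (if cur ≠ [] then outs ++ [String.ofList cur] else outs) true []
      else if c = ']' then
        pvALoop cs (if cur ≠ [] then ins ++ [String.ofList cur] else ins) outs false []
      else
        pvALoop cs ins outs flag (cur ++ [c])

def split_string_by_brackets (input_string : String) : List String × List String :=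
  pvALoop input_string.toList [] [] false []

-- ===== PORT B =====
-- Pass 1 of Source B: tokenize into (segment, terminating bracket) pairs plus a trailing segment.
def pvBTokenize : List Char → List (String × Char) → List Char → List (String × Char) × List Char
  | [], pairs, cur => (pairs, cur)
  | c :: cs, pairs, cur =>
      if c = '[' ∨ c = ']' then pvBTokenize cs (pairs ++ [(String.ofList cur, c)]) []
      else pvBTokenize cs pairs (cur ++ [c])

def split_string_by_brackets_alt (input_string : String) : List String × List String :=
  let r := pvBTokenize input_string.toList [] []
  let pairs := r.1
  let cur := String.ofList r.2
  -- Pass 2 of Source B: classify each segment by the bracket that terminates it.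
  let inside := (pairs.filter (fun p => p.1 ≠ "" ∧ p.2 = ']')).map Prod.fst
  let outside := (pairs.filter (fun p => p.1 ≠ "" ∧ p.2 = '[')).map Prod.fst
  if cur ≠ "" then
    if (match pairs.getLast? with | some p => p.2 = '[' | none => False : Bool) then
      (inside ++ [cur], outside)
    else (inside, outside ++ [cur])
  else (inside, outside)

-- ===== PRECONDITION & SPEC =====
def Spec_split_string_by_brackets (input_string : String) (out : List String × List String) : Prop := out = split_string_by_brackets_alt input_string
instance (input_string : String) (out : List String × List String) : Decidable (Spec_split_string_by_brackets input_string out) := by unfold Spec_split_string_by_brackets; infer_instance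

-- ===== CLAIM (what is proved, stated in full; the proofs are below) =====
def Claim_equal_split_string_by_brackets : Prop := ∀ (input_string : String), Dom_split_string_by_brackets input_string → Spec_split_string_by_brackets input_string (split_string_by_brackets input_string)

-- ===== LEMMAS AND PROOFS =====

-- B's pass 2 and trailing-segment classification, as a function of the tokenizer state.
def pvInsideOf (pairs : List (String × Char)) : List String :=
  (pairs.filter (fun p => p.1 ≠ "" ∧ p.2 = ']')).map Prod.fst

def pvOutsideOf (pairs : List (String × Char)) : List String :=
  (pairs.filter (fun p => p.1 ≠ "" ∧ p.2 = '[')).map Prod.fst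

def pvFlagOf (pairs : List (String × Char)) : Bool :=
  (match pairs.getLast? with | some p => p.2 = '[' | none => False : Bool)

def pvFinalize (pairs : List (String × Char)) (cur : List Char) : List String × List String :=
  if String.ofList cur ≠ "" then
    if pvFlagOf pairs then (pvInsideOf pairs ++ [String.ofList cur], pvOutsideOf pairs)
    else (pvInsideOf pairs, pvOutsideOf pairs ++ [String.ofList cur])
  else (pvInsideOf pairs, pvOutsideOf pairs)

theorem pvInsideOf_append_open (pairs : List (String × Char)) (s : String) :
    pvInsideOf (pairs ++ [(s, '[')]) = pvInsideOf pairs := by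
  simp [pvInsideOf]

theorem pvOutsideOf_append_close (pairs : List (String × Char)) (s : String) :
    pvOutsideOf (pairs ++ [(s, ']')]) = pvOutsideOf pairs := by
  simp [pvOutsideOf]

theorem pvInsideOf_append_close (pairs : List (String × Char)) (s : String) :
    pvInsideOf (pairs ++ [(s, ']')]) =
      pvInsideOf pairs ++ (if s ≠ "" then [s] else []) := by
  by_cases h : s = "" <;> simp [pvInsideOf, h]

theorem pvOutsideOf_append_open (pairs : List (String × Char)) (s : String) :
    pvOutsideOf (pairs ++ [(s, '[')]) =
      pvOutsideOf pairs ++ (if s ≠ "" then [s] else []) := by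
  by_cases h : s = "" <;> simp [pvOutsideOf, h]

theorem pvFlagOf_append (pairs : List (String × Char)) (s : String) (c : Char) :
    pvFlagOf (pairs ++ [(s, c)]) = (c = '[' : Bool) := by
  simp [pvFlagOf]

theorem pvMk_ne_empty_iff (cur : List Char) : (String.ofList cur ≠ "") ↔ cur ≠ [] := by
  rw [ne_eq, ← String.ofList_nil]
  simp

-- Main invariant: running A's loop from a state that matches B's tokenizer state
-- yields B's classification of the final tokenizer state.
theorem pvLoop_eq (cs : List Char) : ∀ (pairs : List (String × Char)) (cur : List Char),
    pvALoop cs (pvInsideOf pairs) (pvOutsideOf pairs) (pvFlagOf pairs) cur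
      = pvFinalize (pvBTokenize cs pairs cur).1 (pvBTokenize cs pairs cur).2 := by
  induction cs with
  | nil =>
      intro pairs cur
      simp only [pvALoop, pvBTokenize, pvFinalize, pvMk_ne_empty_iff]
  | cons c cs ih =>
      intro pairs cur
      by_cases hop : c = '['
      · subst hop
        rw [show pvBTokenize ('[' :: cs) pairs cur
              = pvBTokenize cs (pairs ++ [(String.ofList cur, '[')]) [] by simp [pvBTokenize]]
        rw [← ih (pairs ++ [(String.ofList cur, '[')]) []]
        rw [pvInsideOf_append_open, pvOutsideOf_append_open, pvFlagOf_append]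
        simp only [pvALoop, pvMk_ne_empty_iff]
        by_cases h : cur = [] <;> simp [h]
      · by_cases hcl : c = ']'
        · subst hcl
          rw [show pvBTokenize (']' :: cs) pairs cur
                = pvBTokenize cs (pairs ++ [(String.ofList cur, ']')]) [] by simp [pvBTokenize]]
          rw [← ih (pairs ++ [(String.ofList cur, ']')]) []]
          rw [pvInsideOf_append_close, pvOutsideOf_append_close, pvFlagOf_append]
          simp only [pvALoop, pvMk_ne_empty_iff]
          by_cases h : cur = [] <;> simp [h]
        · rw [show pvBTokenize (c :: cs) pairs cur = pvBTokenize cs pairs (cur ++ [c]) by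
                simp [pvBTokenize, hop, hcl]]
          rw [← ih pairs (cur ++ [c])]
          simp [pvALoop, hop, hcl]

-- ===== VERDICT (by name: the statement is the Claim_ definition above) =====
theorem split_string_by_brackets_spec : Claim_equal_split_string_by_brackets := by
  intro s _
  unfold Spec_split_string_by_brackets split_string_by_brackets split_string_by_brackets_alt
  have h := pvLoop_eq s.toList [] []
  simp only [pvInsideOf, pvOutsideOf, pvFlagOf, List.filter_nil, List.map_nil,
    List.getLast?_nil, decide_false] at h
  rw [h]
  rfl
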